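-- pv_equiv track=rewrite | github.com/reyley/advent_of_code | src/2023/day_10/part_1.py | find_point_after_start
-- ===== SOURCE A (Python) =====
-- def is_up(prev, cur):
--     return prev[0] < cur[0]
--
-- def is_down(prev, cur):
--     return prev[0] > cur[0]
--
-- def is_left(prev, cur):
--     return prev[1] > cur[1]
--
-- def is_right(prev, cur):
--     return prev[1] < cur[1]
--
-- def go_up(cur):
--     return cur[0] - 1, cur[1]
--
-- def go_down(cur):
--     return cur[0] + 1, cur[1]
--
-- def go_left(cur):
--     return cur[0], cur[1] + 1
--
-- def go_right(cur):
--     return cur[0], cur[1] - 1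
--
-- def find_next(prev, cur, grid):
--     cur_char = grid[cur[0]][cur[1]]
--     if cur_char == "|":
--         if is_up(prev, cur):
--             return go_down(cur)
--         if is_down(prev, cur):
--             return go_up(cur)
--     if cur_char == "-":
--         if is_left(prev, cur):
--             return go_right(cur)
--         if is_right(prev, cur):
--             return go_left(cur)
--     if cur_char == "L":
--         if is_up(prev, cur):
--             return go_left(cur)
--         if is_left(prev, cur):
--             return go_up(cur)
--     if cur_char == "J":
--         if is_up(prev, cur):
--             return go_right(cur)
--         if is_right(prev, cur):
--             return go_up(cur)
--     if cur_char == "7":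
--         if is_down(prev, cur):
--             return go_right(cur)
--         if is_right(prev, cur):
--             return go_down(cur)
--     if cur_char == "F":
--         if is_down(prev, cur):
--             return go_left(cur)
--         if is_left(prev, cur):
--             return go_down(cur)
--     return None
--
-- def find_point_after_start(start, grid):
--
--     for offset in (1, -1):
--         for i in (0, 1):
--             cur = list(start)
--             cur[i] += offset
--             try:
--                 res = find_next(start, cur, grid)
--                 if res:
--                     return cur
--             except Exception:
--                 continue
-- ===== SOURCE B (Python) =====
-- # Staged re-implementation: instead of an early-return scan with try/except and
-- # per-character direction logic, invert the relation into a table keyed by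
-- # neighbor offset -> the pipe chars that connect back to start from there,
-- # handle bounds explicitly (keeping Python's negative-index wraparound), build
-- # the full list of connecting neighbors in one comprehension, and return its head.
-- CONNECTS = [((1, 0), ("|", "L", "J")),
--             ((0, 1), ("-", "J", "7")),
--             ((-1, 0), ("|", "7", "F")),
--             ((0, -1), ("-", "L", "F"))]
--
-- def _cell(grid, r, c):
--     n = len(grid)
--     if -n <= r < n:
--         row = grid[r]
--         m = len(row)
--         if -m <= c < m:
--             return row[c]
--     return None
--
-- def find_point_after_start(start, grid):
--     candidates = [[start[0] + dr, start[1] + dc]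
--                   for (dr, dc), chars in CONNECTS
--                   if _cell(grid, start[0] + dr, start[1] + dc) in chars]
--     return candidates[0] if candidates else None
-- ===== Notes on version B (the rewrite author's own statement) =====
-- stated objective: simpler
-- what changed: A's early-return scan with six helper predicates, four movers, a 24-branch per-character dispatch and try/except is replaced by an inverted table (neighbor offset -> pipe chars that connect back), explicit wraparound-aware bounds instead of exceptions, and a staged filter-then-head pipeline: build the whole list of connecting neighbors, then return its first element.
import Mathlib
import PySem

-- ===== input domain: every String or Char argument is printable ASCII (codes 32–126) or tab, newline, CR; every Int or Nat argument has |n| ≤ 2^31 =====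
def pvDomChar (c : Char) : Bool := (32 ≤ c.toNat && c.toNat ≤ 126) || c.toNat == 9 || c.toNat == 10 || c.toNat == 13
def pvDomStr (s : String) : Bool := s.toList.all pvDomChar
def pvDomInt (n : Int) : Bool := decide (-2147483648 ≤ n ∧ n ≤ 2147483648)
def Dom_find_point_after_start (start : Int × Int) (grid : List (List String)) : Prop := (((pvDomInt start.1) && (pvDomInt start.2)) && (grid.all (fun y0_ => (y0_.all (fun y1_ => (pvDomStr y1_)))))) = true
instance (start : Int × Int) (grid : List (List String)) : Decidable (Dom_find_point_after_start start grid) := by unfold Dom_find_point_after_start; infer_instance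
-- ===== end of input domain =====

-- B inverts A's per-character direction logic into an offset -> connecting-chars
-- table, replaces try/except by explicit wraparound-aware bounds, and builds the
-- full candidate list before taking its head (objective: simpler).

-- ===== PORT A =====
def pv_is_up (prev cur : Int × Int) : Bool := prev.1 < cur.1
def pv_is_down (prev cur : Int × Int) : Bool := prev.1 > cur.1
def pv_is_left (prev cur : Int × Int) : Bool := prev.2 > cur.2
def pv_is_right (prev cur : Int × Int) : Bool := prev.2 < cur.2
def pv_go_up (cur : Int × Int) : Int × Int := (cur.1 - 1, cur.2)
def pv_go_down (cur : Int × Int) : Int × Int := (cur.1 + 1, cur.2)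
def pv_go_left (cur : Int × Int) : Int × Int := (cur.1, cur.2 + 1)
def pv_go_right (cur : Int × Int) : Int × Int := (cur.1, cur.2 - 1)

-- outer none = IndexError inside find_next (caught by A's try/except)
def pv_find_next (prev cur : Int × Int) (grid : List (List String)) :
    Option (Option (Int × Int)) :=
  match PySem.List.pyGet? grid cur.1 with
  | none => none
  | some row =>
    match PySem.List.pyGet? row cur.2 with
    | none => none
    | some cur_char =>
      some (
        if cur_char = "|" then
          (if pv_is_up prev cur then some (pv_go_down cur)
           else if pv_is_down prev cur then some (pv_go_up cur) else none)
        else if cur_char = "-" then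
          (if pv_is_left prev cur then some (pv_go_right cur)
           else if pv_is_right prev cur then some (pv_go_left cur) else none)
        else if cur_char = "L" then
          (if pv_is_up prev cur then some (pv_go_left cur)
           else if pv_is_left prev cur then some (pv_go_up cur) else none)
        else if cur_char = "J" then
          (if pv_is_up prev cur then some (pv_go_right cur)
           else if pv_is_right prev cur then some (pv_go_up cur) else none)
        else if cur_char = "7" then
          (if pv_is_down prev cur then some (pv_go_right cur)
           else if pv_is_right prev cur then some (pv_go_down cur) else none)
        else if cur_char = "F" then
          (if pv_is_down prev cur then some (pv_go_left cur)
           else if pv_is_left prev cur then some (pv_go_down cur) else none)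
        else none)

def pv_loopA (start : Int × Int) (grid : List (List String)) :
    List (Int × Int) → Option (List Int)
  | [] => none
  | (offset, i) :: rest =>
    let cur : Int × Int :=
      if i = 0 then (start.1 + offset, start.2) else (start.1, start.2 + offset)
    match pv_find_next start cur grid with
    | none => pv_loopA start grid rest
    | some none => pv_loopA start grid rest
    | some (some _) => some [cur.1, cur.2]

def find_point_after_start (start : Int × Int) (grid : List (List String)) : Option (List Int) :=
  pv_loopA start grid [(1, 0), (1, 1), (-1, 0), (-1, 1)]

-- ===== PORT B =====
def pvCONNECTS : List ((Int × Int) × List String) :=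
  [((1, 0), ["|", "L", "J"]), ((0, 1), ["-", "J", "7"]),
   ((-1, 0), ["|", "7", "F"]), ((0, -1), ["-", "L", "F"])]

def pv_cell (grid : List (List String)) (r c : Int) : Option String :=
  if -(grid.length : Int) ≤ r ∧ r < (grid.length : Int) then
    match PySem.List.pyGet? grid r with  -- in range: plain index grid[r]
    | none => none
    | some row =>
      if -(row.length : Int) ≤ c ∧ c < (row.length : Int) then
        PySem.List.pyGet? row c  -- in range: row[c]
      else none
  else none

-- the comprehension's element/condition: emit [r,c] when the neighbor's char connects
def pv_candidate (start : Int × Int) (grid : List (List String))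
    (p : (Int × Int) × List String) : Option (List Int) :=
  if (match pv_cell grid (start.1 + p.1.1) (start.2 + p.1.2) with
      | some ch => p.2.contains ch
      | none => false)
  then some [start.1 + p.1.1, start.2 + p.1.2] else none

def find_point_after_start_alt (start : Int × Int) (grid : List (List String)) : Option (List Int) :=
  (pvCONNECTS.filterMap (pv_candidate start grid)).head?

-- ===== PRECONDITION & SPEC =====
def Spec_find_point_after_start (start : Int × Int) (grid : List (List String)) (out : Option (List Int)) : Prop := out = find_point_after_start_alt start grid
instance (start : Int × Int) (grid : List (List String)) (out : Option (List Int)) : Decidable (Spec_find_point_after_start start grid out) := by unfold Spec_find_point_after_start; infer_instance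

-- ===== CLAIM =====
def Claim_equal_find_point_after_start : Prop := ∀ (start : Int × Int) (grid : List (List String)), Dom_find_point_after_start start grid → Spec_find_point_after_start start grid (find_point_after_start start grid)

-- ===== LEMMAS AND PROOFS =====
theorem pv_cell_eq (grid : List (List String)) (r c : Int) :
    pv_cell grid r c =
      (PySem.List.pyGet? grid r).bind (fun row => PySem.List.pyGet? row c) := by
  unfold pv_cell
  rcases h : PySem.List.pyGet? grid r with _ | row
  · have h' := h
    rw [PySem.List.pyGet?_eq_none_iff, PySem.Raise.InRange] at h'
    simp only [not_and_or, not_le, not_lt] at h'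
    rw [if_neg (by omega), Option.bind]
  · have hin : PySem.Raise.InRange grid.length r := by
      by_contra hn
      rw [← PySem.List.pyGet?_eq_none_iff] at hn
      simp [hn] at h
    unfold PySem.Raise.InRange at hin
    rw [if_pos (by omega)]
    rcases h2 : PySem.List.pyGet? row c with _ | ch
    · have h2' := h2
      rw [PySem.List.pyGet?_eq_none_iff, PySem.Raise.InRange] at h2'
      simp only [not_and_or, not_le, not_lt] at h2'
      simp only []
      rw [if_neg (by omega)]
      simp [h2]
    · have hin2 : PySem.Raise.InRange row.length c := by
        by_contra hn
        rw [← PySem.List.pyGet?_eq_none_iff] at hn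
        simp [hn] at h2
      unfold PySem.Raise.InRange at hin2
      simp only []
      rw [if_pos (by omega)]
      simp [h2]

-- head? of a filterMap, one step at a time
theorem pv_head_filterMap_cons {α β : Type} (f : α → Option β) (x : α) (l : List α) :
    ((x :: l).filterMap f).head? =
      (match f x with | some v => some v | none => (l.filterMap f).head?) := by
  cases h : f x <;> simp [h]

theorem pv_step1 (start : Int × Int) (grid : List (List String))
    (rest : List (Int × Int)) :
    pv_loopA start grid ((1, 0) :: rest) =
      (match pv_candidate start grid (((1, 0), ["|", "L", "J"])) with
       | some v => some v
       | none => pv_loopA start grid rest) := by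
  rcases hg : PySem.List.pyGet? grid (start.1 + 1) with _ | row
  · simp [pv_loopA, pv_candidate, pv_cell_eq, pv_find_next, hg]
  · rcases hr : PySem.List.pyGet? row (start.2) with _ | ch
    · simp [pv_loopA, pv_candidate, pv_cell_eq, pv_find_next, hg, hr]
    · simp only [pv_loopA, pv_candidate, pv_cell_eq, pv_find_next,
        pv_is_up, pv_is_down, pv_is_left, pv_is_right, hg, hr, Option.bind]
      norm_num
      by_cases h1 : ch = "|" <;> by_cases h2 : ch = "-" <;> by_cases h3 : ch = "L" <;>
        by_cases h4 : ch = "J" <;> by_cases h5 : ch = "7" <;> by_cases h6 : ch = "F" <;>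
        simp_all

theorem pv_step2 (start : Int × Int) (grid : List (List String))
    (rest : List (Int × Int)) :
    pv_loopA start grid ((1, 1) :: rest) =
      (match pv_candidate start grid (((0, 1), ["-", "J", "7"])) with
       | some v => some v
       | none => pv_loopA start grid rest) := by
  rcases hg : PySem.List.pyGet? grid (start.1) with _ | row
  · simp [pv_loopA, pv_candidate, pv_cell_eq, pv_find_next, hg]
  · rcases hr : PySem.List.pyGet? row (start.2 + 1) with _ | ch
    · simp [pv_loopA, pv_candidate, pv_cell_eq, pv_find_next, hg, hr]
    · simp only [pv_loopA, pv_candidate, pv_cell_eq, pv_find_next,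
        pv_is_up, pv_is_down, pv_is_left, pv_is_right, hg, hr, Option.bind]
      norm_num
      by_cases h1 : ch = "|" <;> by_cases h2 : ch = "-" <;> by_cases h3 : ch = "L" <;>
        by_cases h4 : ch = "J" <;> by_cases h5 : ch = "7" <;> by_cases h6 : ch = "F" <;>
        simp_all

theorem pv_step3 (start : Int × Int) (grid : List (List String))
    (rest : List (Int × Int)) :
    pv_loopA start grid ((-1, 0) :: rest) =
      (match pv_candidate start grid (((-1, 0), ["|", "7", "F"])) with
       | some v => some v
       | none => pv_loopA start grid rest) := by
  rcases hg : PySem.List.pyGet? grid (start.1 + -1) with _ | row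
  · simp [pv_loopA, pv_candidate, pv_cell_eq, pv_find_next, hg]
  · rcases hr : PySem.List.pyGet? row (start.2) with _ | ch
    · simp [pv_loopA, pv_candidate, pv_cell_eq, pv_find_next, hg, hr]
    · simp only [pv_loopA, pv_candidate, pv_cell_eq, pv_find_next,
        pv_is_up, pv_is_down, pv_is_left, pv_is_right, hg, hr, Option.bind]
      norm_num
      by_cases h1 : ch = "|" <;> by_cases h2 : ch = "-" <;> by_cases h3 : ch = "L" <;>
        by_cases h4 : ch = "J" <;> by_cases h5 : ch = "7" <;> by_cases h6 : ch = "F" <;>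
        simp_all

theorem pv_step4 (start : Int × Int) (grid : List (List String))
    (rest : List (Int × Int)) :
    pv_loopA start grid ((-1, 1) :: rest) =
      (match pv_candidate start grid (((0, -1), ["-", "L", "F"])) with
       | some v => some v
       | none => pv_loopA start grid rest) := by
  rcases hg : PySem.List.pyGet? grid (start.1) with _ | row
  · simp [pv_loopA, pv_candidate, pv_cell_eq, pv_find_next, hg]
  · rcases hr : PySem.List.pyGet? row (start.2 + -1) with _ | ch
    · simp [pv_loopA, pv_candidate, pv_cell_eq, pv_find_next, hg, hr]
    · simp only [pv_loopA, pv_candidate, pv_cell_eq, pv_find_next,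
        pv_is_up, pv_is_down, pv_is_left, pv_is_right, hg, hr, Option.bind]
      norm_num
      by_cases h1 : ch = "|" <;> by_cases h2 : ch = "-" <;> by_cases h3 : ch = "L" <;>
        by_cases h4 : ch = "J" <;> by_cases h5 : ch = "7" <;> by_cases h6 : ch = "F" <;>
        simp_all

-- ===== VERDICT =====
theorem find_point_after_start_spec : Claim_equal_find_point_after_start := by
  intro start grid _
  unfold Spec_find_point_after_start find_point_after_start find_point_after_start_alt pvCONNECTS
  rw [pv_step1, pv_head_filterMap_cons]
  cases pv_candidate start grid ((1, 0), ["|", "L", "J"]) with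
  | some v => rfl
  | none =>
    rw [pv_step2, pv_head_filterMap_cons]
    cases pv_candidate start grid ((0, 1), ["-", "J", "7"]) with
    | some v => rfl
    | none =>
      rw [pv_step3, pv_head_filterMap_cons]
      cases pv_candidate start grid ((-1, 0), ["|", "7", "F"]) with
      | some v => rfl
      | none =>
        rw [pv_step4, pv_head_filterMap_cons]
        cases pv_candidate start grid ((0, -1), ["-", "L", "F"]) with
        | some v => rfl
        | none => rfl
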